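-- pv_equiv track=rewrite | github.com/tommyskeff/bio-practice | 2021.py | is_pat
-- ===== SOURCE A (Python) =====
-- def is_pat(word):
--     if len(word) < 2:
--         return True
--
--     for m in range(1, len(word)):
--         s1, s2 = word[:m], word[m:]
--
--         if min([ord(c) for c in s1]) <= max([ord(c) for c in s2]):
--             continue
--
--         if is_pat(s1[::-1]) and is_pat(s2[::-1]):
--             return True
--
--     return False
-- ===== SOURCE B (Python) =====
-- def _scanmin(v):
--     # r[i] = min(v[:i+1]), one forward pass
--     r = []
--     cur = 0
--     for x in v:
--         cur = x if not r else min(cur, x)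
--         r.append(cur)
--     return r
--
--
-- def _scanmax(v):
--     # r[i] = max(v[i:]), one backward pass
--     r = []
--     cur = 0
--     for x in reversed(v):
--         cur = x if not r else max(cur, x)
--         r.append(cur)
--     r.reverse()
--     return r
--
--
-- def _pat(v):
--     n = len(v)
--     if n < 2:
--         return True
--     pmin = _scanmin(v)
--     smax = _scanmax(v)
--     for m in range(1, n):
--         if pmin[m - 1] > smax[m] and _pat(v[:m][::-1]) and _pat(v[m:][::-1]):
--             return True
--     return False
--
--
-- def is_pat(word):
--     return _pat([ord(c) for c in word])
-- ===== Notes on version B (the rewrite author's own statement) =====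
-- stated objective: faster
-- what changed: B converts the string to ord codes once and precomputes prefix-min and suffix-max scan arrays per call, so each split test is an O(1) lookup instead of A's O(n) min/max over fresh list comprehensions.
import Mathlib
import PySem

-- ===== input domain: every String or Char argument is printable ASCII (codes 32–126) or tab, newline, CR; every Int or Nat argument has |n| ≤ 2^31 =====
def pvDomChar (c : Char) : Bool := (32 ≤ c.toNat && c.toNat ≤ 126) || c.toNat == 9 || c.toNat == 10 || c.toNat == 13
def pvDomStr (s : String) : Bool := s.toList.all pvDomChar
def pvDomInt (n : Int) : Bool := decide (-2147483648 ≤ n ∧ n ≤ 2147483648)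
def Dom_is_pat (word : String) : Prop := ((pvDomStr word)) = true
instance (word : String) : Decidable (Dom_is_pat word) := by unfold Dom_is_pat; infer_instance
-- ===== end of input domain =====

-- B replaces A's per-split O(n) min/max list comprehensions by one prefix-min and one
-- suffix-max scan per call, making each split test O(1) (objective: faster).


-- ===== PORT A =====
-- ord(c) as an Int
def pvOrd (c : Char) : Int := (c.toNat : Int)

-- literal transliteration of A's recursion over the string's characters;
-- word[:m]/word[m:]/[::-1] are take/drop/reverse (exact: PySem slice_to_natCast /
-- slice_from_natCast / slice?_none_none_neg_one), min()/max() of the nonempty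
-- comprehensions are PySem.List.min?/max?; the `none` match arm is unreachable
-- (both slices are nonempty for 1 ≤ m < len).
def isPatA (l : List Char) : Bool :=
  if _h : l.length < 2 then true
  else
    (List.range' 1 (l.length - 1)).attach.any fun m =>
      let s1 := l.take m.1
      let s2 := l.drop m.1
      match PySem.List.min? (s1.map pvOrd) (fun y => y),
            PySem.List.max? (s2.map pvOrd) (fun y => y) with
      | some mn, some mx =>
          if mn ≤ mx then false
          else isPatA s1.reverse && isPatA s2.reverse
      | _, _ => false
termination_by l.length
decreasing_by
  all_goals
    have hm := List.mem_range'_1.mp m.2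
    simp only [List.length_reverse, List.length_take, List.length_drop]
    omega

def is_pat (word : String) : Bool := isPatA word.toList

-- ===== PORT B =====
-- _scanmin: forward pass, r[i] = running minimum of v[:i+1]
def scanminB (v : List Int) : List Int :=
  (v.foldl (fun (st : List Int × Int) x =>
      let cur := if st.1.isEmpty then x else min st.2 x
      (st.1 ++ [cur], cur)) ([], 0)).1

-- _scanmax: backward pass over reversed(v), reversed at the end; r[i] = max of v[i:]
def scanmaxB (v : List Int) : List Int :=
  ((v.reverse.foldl (fun (st : List Int × Int) x =>
      let cur := if st.1.isEmpty then x else max st.2 x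
      (st.1 ++ [cur], cur)) ([], 0)).1).reverse

-- _pat: the Python list indexings pmin[m-1], smax[m] are in range, so List.getD is exact
def patB (v : List Int) : Bool :=
  if _h : v.length < 2 then true
  else
    let pmin := scanminB v
    let smax := scanmaxB v
    (List.range' 1 (v.length - 1)).attach.any fun m =>
      decide (pmin.getD (m.1 - 1) 0 > smax.getD m.1 0) &&
        patB (v.take m.1).reverse && patB (v.drop m.1).reverse
termination_by v.length
decreasing_by
  all_goals
    have hm := List.mem_range'_1.mp m.2
    simp only [List.length_reverse, List.length_take, List.length_drop]
    omega

def is_pat_alt (word : String) : Bool := patB (word.toList.map pvOrd)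

-- ===== PRECONDITION & SPEC =====
def Spec_is_pat (word : String) (out : Bool) : Prop := out = is_pat_alt word
instance (word : String) (out : Bool) : Decidable (Spec_is_pat word out) := by unfold Spec_is_pat; infer_instance

-- ===== CLAIM (what is proved, stated in full; the proofs are below) =====
def Claim_equal_is_pat : Prop := ∀ (word : String), Dom_is_pat word → Spec_is_pat word (is_pat word)

-- ===== LEMMAS AND PROOFS =====

-- proof-side specification of both scan loops (f = min or max)
def scanSpec (f : Int → Int → Int) : List Int → Int → List Int
  | [], _ => []
  | x :: t, a => f a x :: scanSpec f t (f a x)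

theorem scanSpec_length (f : Int → Int → Int) (t : List Int) (a : Int) :
    (scanSpec f t a).length = t.length := by
  induction t generalizing a with
  | nil => rfl
  | cons x t ih => simp [scanSpec, ih]

-- loop invariant of the scan folds
theorem scan_foldl (f : Int → Int → Int) (u : List Int) (r : List Int) (c : Int) (h : r ≠ []) :
    (u.foldl (fun (st : List Int × Int) x =>
        let cur := if st.1.isEmpty then x else f st.2 x
        (st.1 ++ [cur], cur)) (r, c)).1 = r ++ scanSpec f u c := by
  induction u generalizing r c with
  | nil => simp [scanSpec]
  | cons x u ih =>
      have hne : r.isEmpty = false := by simpa [List.isEmpty_iff] using h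
      simp only [List.foldl_cons, hne, Bool.false_eq_true, if_false, scanSpec]
      rw [show r ++ f c x :: scanSpec f u (f c x) = (r ++ [f c x]) ++ scanSpec f u (f c x) by simp]
      exact ih (r ++ [f c x]) (f c x) (by simp)

theorem scanmin_cons (x : Int) (t : List Int) :
    scanminB (x :: t) = x :: scanSpec min t x := by
  unfold scanminB
  simp only [List.foldl_cons, List.isEmpty_nil, if_pos, List.nil_append]
  exact scan_foldl min t [x] x (by simp)

theorem scanmax_rev (v : List Int) (z : Int) (s : List Int) (h : v.reverse = z :: s) :
    scanmaxB v = (z :: scanSpec max s z).reverse := by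
  unfold scanmaxB
  rw [h]
  simp only [List.foldl_cons, List.isEmpty_nil, if_pos, List.nil_append]
  rw [scan_foldl max s [z] z (by simp)]
  rfl

-- element access of a headed scanSpec list
theorem scanSpec_getD (f : Int → Int → Int) (t : List Int) (a : Int) (k : Nat) (h : k ≤ t.length) :
    (a :: scanSpec f t a).getD k 0 = (t.take k).foldl f a := by
  induction t generalizing a k with
  | nil =>
      have hk : k = 0 := by simpa using h
      subst hk; simp
  | cons x t ih =>
      cases k with
      | zero => simp
      | succ k =>
          simp only [scanSpec, List.getD_cons_succ, List.take_succ_cons, List.foldl_cons]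
          exact ih (f a x) k (by simpa using h)

-- foldl max: seed commutation, member absorption, reverse invariance
theorem foldl_max_pull (t : List Int) (a b : Int) :
    t.foldl max (max a b) = max a (t.foldl max b) := by
  induction t generalizing b with
  | nil => rfl
  | cons y t ih =>
      simp only [List.foldl_cons]
      rw [max_assoc, ih]

theorem foldl_max_absorb (r : List Int) (b c : Int) (h : c ∈ r) :
    r.foldl max (max b c) = r.foldl max b := by
  induction r generalizing b with
  | nil => cases h
  | cons x t ih =>
      simp only [List.foldl_cons]
      rcases List.mem_cons.mp h with rfl | hc
      · rw [max_assoc, max_self]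
      · rw [max_right_comm, ih (max b x) hc]

theorem foldl_max_reverse (l : List Int) (a : Int) :
    l.reverse.foldl max a = l.foldl max a := by
  induction l generalizing a with
  | nil => rfl
  | cons x t ih =>
      simp only [List.reverse_cons, List.foldl_append, List.foldl_cons, List.foldl_nil, ih]
      rw [max_comm _ x, max_comm a x, foldl_max_pull]

-- the backward scan seen from the front: fold of the tail from the head
theorem foldl_max_rev_head (y : Int) (r : List Int) (z : Int) (s : List Int)
    (h : (y :: r).reverse = z :: s) : s.foldl max z = r.foldl max y := by
  have hz : z ∈ y :: r := List.mem_reverse.mp (h ▸ List.mem_cons_self)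
  have hr := foldl_max_reverse (y :: r) z
  rw [h] at hr
  simp only [List.foldl_cons, max_self] at hr
  rw [hr]
  rcases List.mem_cons.mp hz with rfl | hzr
  · rw [max_self]
  · rw [max_comm z y, foldl_max_absorb r y z hzr]

-- B's prefix-min lookup equals A's min() over the prefix
theorem pmin_getD (x : Int) (t : List Int) (m : Nat) (h1 : 1 ≤ m) (h2 : m ≤ t.length + 1) :
    (scanminB (x :: t)).getD (m - 1) 0 = (t.take (m - 1)).foldl min x := by
  rw [scanmin_cons]
  exact scanSpec_getD min t x (m - 1) (by omega)

-- B's suffix-max lookup equals A's max() over the suffix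
theorem smax_getD (v : List Int) (m : Nat) (y : Int) (r : List Int)
    (hd : v.drop m = y :: r) (hm : m < v.length) :
    (scanmaxB v).getD m 0 = r.foldl max y := by
  have hvne : v ≠ [] := by intro h; rw [h] at hm; simp at hm
  obtain ⟨z, s, hzs⟩ : ∃ z s, v.reverse = z :: s := by
    cases hrev : v.reverse with
    | nil => exact absurd (by simpa using hrev) hvne
    | cons z s => exact ⟨z, s, rfl⟩
  rw [scanmax_rev v z s hzs]
  have hslen : s.length = v.length - 1 := by
    have := congrArg List.length hzs; simp at this; omega
  have hlen : (z :: scanSpec max s z).length = v.length := by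
    simp [scanSpec_length]; omega
  have hmlt : m < (z :: scanSpec max s z).length := by omega
  rw [List.getD_eq_getElem?_getD, List.getElem?_reverse (by omega),
      ← List.getD_eq_getElem?_getD]
  have hidx : (z :: scanSpec max s z).length - 1 - m = v.length - 1 - m := by omega
  rw [hidx]
  have hk : v.length - 1 - m ≤ s.length := by omega
  rw [scanSpec_getD max s z (v.length - 1 - m) hk]
  -- identify s.take (v.length - 1 - m) via the reversed drop
  have htake : (v.drop m).reverse = z :: s.take (v.length - 1 - m) := by
    have : v.reverse.take (v.length - m) = (v.drop m).reverse := by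
      rw [List.take_reverse]
      congr 1
      congr 1
      omega
    rw [← this, hzs, List.take_cons (by omega)]
    congr 2
    omega
  rw [hd] at htake
  exact foldl_max_rev_head y r z (s.take (v.length - 1 - m)) htake

-- A's min() over the nonempty prefix, in headed-fold form
theorem minA_take (x : Int) (t : List Int) (m : Nat) (h1 : 1 ≤ m) :
    PySem.List.min? ((x :: t).take m) (fun y => y) = some ((t.take (m - 1)).foldl min x) := by
  obtain ⟨k, rfl⟩ : ∃ k, m = k + 1 := ⟨m - 1, by omega⟩
  rw [List.take_succ_cons, PySem.List.min?_id_cons]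
  simp

-- the main equivalence, by strong induction on the length
theorem attach_any_range_congr (n1 n2 : Nat) (h : n1 = n2)
    (f : {x // x ∈ List.range' 1 n1} → Bool) (g : {x // x ∈ List.range' 1 n2} → Bool)
    (hfg : ∀ (m : Nat) (h1 : m ∈ List.range' 1 n1) (h2 : m ∈ List.range' 1 n2),
      f ⟨m, h1⟩ = g ⟨m, h2⟩) :
    (List.range' 1 n1).attach.any f = (List.range' 1 n2).attach.any g := by
  subst h
  have : f = g := funext fun x => by
    obtain ⟨m, hm⟩ := x
    exact hfg m hm hm
  rw [this]

theorem isPatA_eq_patB : ∀ (w : List Char), isPatA w = patB (w.map pvOrd) := by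
  suffices h : ∀ (n : Nat) (w : List Char), w.length = n → isPatA w = patB (w.map pvOrd) by
    intro w; exact h w.length w rfl
  intro n
  induction n using Nat.strong_induction_on with
  | _ n ih =>
  intro w hlen
  rw [isPatA, patB]
  by_cases hsmall : w.length < 2
  · simp [hsmall]
  · rw [dif_neg hsmall, dif_neg (by simpa using hsmall)]
    refine attach_any_range_congr _ _ (by simp) _ _ ?_
    intro m hm h2
    simp only
    have hmr := List.mem_range'_1.mp hm
    have hm1 : 1 ≤ m := hmr.1
    -- decompose w and its ord image
    obtain ⟨c, w0, rfl⟩ : ∃ c w0, w = c :: w0 := by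
      cases w with
      | nil => simp at hmr; omega
      | cons c w0 => exact ⟨c, w0, rfl⟩
    have hm2 : m < w0.length + 1 := by simp at hmr; omega
    have hn : n = w0.length + 1 := by simp at hlen; omega
    have hvlen : ((c :: w0).map pvOrd).length = w0.length + 1 := by simp
    -- the suffix is nonempty
    obtain ⟨y, r, hdrop⟩ : ∃ y r, ((c :: w0).map pvOrd).drop m = y :: r := by
      cases hd : ((c :: w0).map pvOrd).drop m with
      | nil =>
          exfalso
          have := congrArg List.length hd
          simp at this
          omega
      | cons y r => exact ⟨y, r, rfl⟩
    -- A's min and max in fold form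
    have hmin : PySem.List.min? (((c :: w0).take m).map pvOrd) (fun y => y)
        = some (((w0.map pvOrd).take (m - 1)).foldl min (pvOrd c)) := by
      rw [List.map_take]
      exact minA_take (pvOrd c) (w0.map pvOrd) m hm1
    have hmax : PySem.List.max? (((c :: w0).drop m).map pvOrd) (fun y => y)
        = some (r.foldl max y) := by
      rw [List.map_drop, hdrop, PySem.List.max?_id_cons]
    -- B's two lookups
    have hpmin : (scanminB ((c :: w0).map pvOrd)).getD (m - 1) 0
        = ((w0.map pvOrd).take (m - 1)).foldl min (pvOrd c) :=
      pmin_getD (pvOrd c) (w0.map pvOrd) m hm1 (by simp; omega)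
    have hsmax : (scanmaxB ((c :: w0).map pvOrd)).getD m 0 = r.foldl max y :=
      smax_getD ((c :: w0).map pvOrd) m y r hdrop (by simp; omega)
    -- now both branch conditions coincide
    simp only [hmin, hmax, hpmin, hsmax]
    set mn := ((w0.map pvOrd).take (m - 1)).foldl min (pvOrd c)
    set mx := r.foldl max y
    by_cases hle : mn ≤ mx
    · simp only [if_pos hle, decide_eq_false (not_lt.mpr hle), Bool.false_and]
    · have hgt : mx < mn := lt_of_not_ge hle
      simp only [if_neg hle, hgt, decide_true, Bool.true_and]
      have e1 : isPatA ((c :: w0).take m).reverse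
          = patB (((((c :: w0).map pvOrd)).take m).reverse) := by
        rw [ih _ (by simp; omega) ((c :: w0).take m).reverse rfl]
        rw [List.map_reverse, List.map_take]
      have e2 : isPatA ((c :: w0).drop m).reverse
          = patB (((((c :: w0).map pvOrd)).drop m).reverse) := by
        rw [ih _ (by simp; omega) ((c :: w0).drop m).reverse rfl]
        rw [List.map_reverse, List.map_drop]
      rw [e1, e2]

-- ===== VERDICT (by name: the statement is the Claim_ definition above) =====
theorem is_pat_spec : Claim_equal_is_pat := by
  intro word _
  unfold Spec_is_pat is_pat is_pat_alt
  exact isPatA_eq_patB word.toList
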